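-- pv_equiv track=rewrite | github.com/ash12358/new_crawl_instagram | crawl.py | convert_text_to_a_line
-- ===== SOURCE A (Python) =====
-- def convert_text_to_a_line(text):
--     texts = text.split('\n')
--     text = ''
--     for te in texts:
--         text += te.strip()
--         if len(te.strip()) > 0:
--             text += ' '
--     text = text[:-1]
--     return text
-- ===== SOURCE B (Python) =====
-- def convert_text_to_a_line(text):
--     # Build the result back-to-front: walk the lines in reverse, prepending each
--     # non-empty stripped line with a single separating space; no trailing-space
--     # chop is ever needed.
--     res = ''
--     for te in reversed(text.split('\n')):
--         t = te.strip()
--         if t: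
--             res = t + ' ' + res if res else t
--     return res
-- ===== Notes on version B (the rewrite author's own statement) =====
-- stated objective: alternative
-- what changed: A appends each stripped line plus a trailing space left-to-right and chops the last character at the end; B builds the result back-to-front over the reversed line list, prepending a separating space only when something already follows, so no final chop exists.
import Mathlib
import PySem

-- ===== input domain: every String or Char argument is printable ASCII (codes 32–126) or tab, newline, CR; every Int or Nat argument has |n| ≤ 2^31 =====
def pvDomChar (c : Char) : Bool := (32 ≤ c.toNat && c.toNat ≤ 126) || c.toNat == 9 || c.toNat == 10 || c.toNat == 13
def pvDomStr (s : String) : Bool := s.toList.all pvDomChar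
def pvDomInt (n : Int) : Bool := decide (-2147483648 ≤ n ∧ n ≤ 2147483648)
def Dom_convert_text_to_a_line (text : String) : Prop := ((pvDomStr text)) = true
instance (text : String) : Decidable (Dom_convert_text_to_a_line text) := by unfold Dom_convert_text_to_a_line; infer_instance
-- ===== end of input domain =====

-- B builds the joined line back-to-front over the reversed line list (conditional
-- separator prepend) instead of A's append-then-chop-trailing-space loop; objective: alternative.


-- ===== PORT A =====
-- texts = text.split('\n'); accumulate stripped line + ' ' when non-empty; finally text[:-1]
def convert_text_to_a_line (text : String) : String :=
  let texts := PySem.Chars.splitOn text.toList ['\n']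
  let t := texts.foldl (fun acc te =>
      let acc := acc ++ PySem.Chars.strip te
      if 0 < PySem.Chars.len (PySem.Chars.strip te) then acc ++ [' '] else acc) []
  String.ofList (PySem.List.slice t none (some (-1)))

-- ===== PORT B =====
-- for te in reversed(text.split('\n')): t = te.strip(); if t: res = t + ' ' + res if res else t
def convert_text_to_a_line_alt (text : String) : String :=
  let res := (PySem.Chars.splitOn text.toList ['\n']).reverse.foldl (fun res te =>
      let t := PySem.Chars.strip te
      if t ≠ [] then (if res ≠ [] then t ++ ' ' :: res else t) else res) []
  String.ofList res

-- ===== PRECONDITION & SPEC =====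
def Spec_convert_text_to_a_line (text : String) (out : String) : Prop := out = convert_text_to_a_line_alt text
instance (text : String) (out : String) : Decidable (Spec_convert_text_to_a_line text out) := by unfold Spec_convert_text_to_a_line; infer_instance

-- ===== CLAIM (what is proved, stated in full; the proofs are below) =====
def Claim_equal_convert_text_to_a_line : Prop := ∀ (text : String), Dom_convert_text_to_a_line text → Spec_convert_text_to_a_line text (convert_text_to_a_line text)

-- ===== LEMMAS AND PROOFS =====

-- strip is non-empty iff its Python len is positive
theorem pvLenPos (s : List Char) : 0 < PySem.Chars.len s ↔ s ≠ [] := by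
  rw [PySem.Chars.len_eq]
  cases s <;> simp

-- the string A's loop builds from an empty accumulator: each non-empty stripped line followed by ' '
def pvJoinSp : List (List Char) → List Char
  | [] => []
  | l :: ls =>
      PySem.Chars.strip l ++ ((if 0 < PySem.Chars.len (PySem.Chars.strip l) then [' '] else []) ++ pvJoinSp ls)

theorem pvFoldA (ls : List (List Char)) (acc : List Char) :
    ls.foldl (fun acc te =>
      let acc := acc ++ PySem.Chars.strip te
      if 0 < PySem.Chars.len (PySem.Chars.strip te) then acc ++ [' '] else acc) acc
      = acc ++ pvJoinSp ls := by
  induction ls generalizing acc with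
  | nil => simp [pvJoinSp]
  | cons l ls ih =>
      rw [List.foldl_cons, ih]
      dsimp only
      by_cases hl : 0 < PySem.Chars.len (PySem.Chars.strip l)
      · rw [if_pos hl, pvJoinSp, if_pos hl]
        simp [List.append_assoc]
      · rw [if_neg hl, pvJoinSp, if_neg hl]
        simp [List.append_assoc]

theorem pvJoin_dropLast_ne_nil (ls : List (List Char)) (h : pvJoinSp ls ≠ []) :
    (pvJoinSp ls).dropLast ≠ [] := by
  induction ls with
  | nil => simp [pvJoinSp] at h
  | cons l ls ih =>
      rw [pvJoinSp] at h ⊢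
      by_cases hl : 0 < PySem.Chars.len (PySem.Chars.strip l)
      · have hs : PySem.Chars.strip l ≠ [] := (pvLenPos _).mp hl
        rw [if_pos hl]
        rw [show ([' '] ++ pvJoinSp ls) = ' ' :: pvJoinSp ls from rfl]
        rw [List.dropLast_append_of_ne_nil (List.cons_ne_nil _ _)]
        simp [hs]
      · have hs : PySem.Chars.strip l = [] := by
          by_contra hne
          exact hl ((pvLenPos _).mpr hne)
        rw [if_neg hl] at h ⊢
        rw [hs] at h ⊢
        simp only [List.nil_append] at h ⊢
        exact ih h

theorem pvFoldB (ls : List (List Char)) :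
    ls.reverse.foldl (fun res te =>
      let t := PySem.Chars.strip te
      if t ≠ [] then (if res ≠ [] then t ++ ' ' :: res else t) else res) []
      = (pvJoinSp ls).dropLast := by
  rw [List.foldl_reverse]
  induction ls with
  | nil => simp [pvJoinSp]
  | cons l ls ih =>
      rw [List.foldr_cons, ih, pvJoinSp]
      dsimp only
      by_cases hl : PySem.Chars.strip l = []
      · have h0 : ¬ 0 < PySem.Chars.len (PySem.Chars.strip l) := by
          rw [pvLenPos]; simpa using hl
        rw [if_neg h0, hl]
        simp
      · have hlen : 0 < PySem.Chars.len (PySem.Chars.strip l) := (pvLenPos _).mpr hl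
        rw [if_pos hlen, if_pos hl]
        rw [show ([' '] ++ pvJoinSp ls) = ' ' :: pvJoinSp ls from rfl]
        by_cases hj : pvJoinSp ls = []
        · rw [hj]
          simp
        · have hd : (pvJoinSp ls).dropLast ≠ [] := pvJoin_dropLast_ne_nil ls hj
          rw [if_pos hd]
          rw [List.dropLast_append_of_ne_nil (List.cons_ne_nil _ _),
              List.dropLast_cons_of_ne_nil hj]

-- ===== VERDICT (by name: the statement is the Claim_ definition above) =====
theorem convert_text_to_a_line_spec : Claim_equal_convert_text_to_a_line := by
  intro text _
  unfold Spec_convert_text_to_a_line convert_text_to_a_line convert_text_to_a_line_alt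
  dsimp only
  rw [pvFoldA, pvFoldB, PySem.List.slice_to_neg_one, List.nil_append]
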